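-- pv_equiv track=rewrite | github.com/nYcnela/MagisterkaProgram | ComputeNode/backend_embedded/src/pipeline_core/realtime/prompt_windows.py | _best_expected_subsequence
-- ===== SOURCE A (Python) =====
-- from typing import Any, Dict, Iterable, List, Optional, Tuple
--
-- def _edit_distance(a: List[str], b: List[str]) -> int:
--     n, m = len(a), len(b)
--     if n == 0:
--         return m
--     if m == 0:
--         return n
--     dp = [[0] * (m + 1) for _ in range(n + 1)]
--     for i in range(n + 1):
--         dp[i][0] = i
--     for j in range(m + 1):
--         dp[0][j] = j
--     for i in range(1, n + 1):
--         for j in range(1, m + 1):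
--             cost = 0 if a[i - 1] == b[j - 1] else 1
--             dp[i][j] = min(
--                 dp[i - 1][j] + 1,
--                 dp[i][j - 1] + 1,
--                 dp[i - 1][j - 1] + cost,
--             )
--     return dp[n][m]
--
-- def _best_expected_subsequence(ref_sequence: List[str], observed: List[str]) -> List[str]:
--     if not observed:
--         return []
--     k = len(observed)
--     if not ref_sequence:
--         return []
--     if len(ref_sequence) <= k:
--         return ref_sequence
--
--     best = ref_sequence[:k]
--     best_d = _edit_distance(observed, best)
--     for i in range(1, len(ref_sequence) - k + 1):
--         cand = ref_sequence[i : i + k]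
--         d = _edit_distance(observed, cand)
--         if d < best_d:
--             best_d = d
--             best = cand
--     return best
-- ===== SOURCE B (Python) =====
-- def _best_expected_subsequence(ref_sequence, observed):
--     if not observed or not ref_sequence:
--         return []
--     k, n = len(observed), len(ref_sequence)
--     if n <= k:
--         return ref_sequence
--
--     def dist(cand):
--         # top-down memoized recursion over prefix lengths (i of observed, j of cand)
--         memo = {}
--         def ed(i, j):
--             if i == 0:
--                 return j
--             if j == 0:
--                 return i
--             key = (i, j)
--             if key not in memo:
--                 c = 0 if observed[i - 1] == cand[j - 1] else 1
--                 memo[key] = min(ed(i - 1, j) + 1, ed(i, j - 1) + 1, ed(i - 1, j - 1) + c)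
--             return memo[key]
--         return ed(k, len(cand))
--
--     best_i = min(range(n - k + 1), key=lambda i: dist(ref_sequence[i:i + k]))
--     return ref_sequence[best_i:best_i + k]
-- ===== Notes on version B (the rewrite author's own statement) =====
-- stated objective: alternative
-- what changed: A's bottom-up (n+1)x(m+1) edit-distance matrix filled row by row is replaced by a top-down memoized recursion ed(i,j) over the two prefix lengths (dict-keyed memo, demand-driven evaluation), and A's explicit best/best_d accumulator loop is replaced by a first-argmin min(range, key=dist) with the same first-wins tie-break.
import Mathlib
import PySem

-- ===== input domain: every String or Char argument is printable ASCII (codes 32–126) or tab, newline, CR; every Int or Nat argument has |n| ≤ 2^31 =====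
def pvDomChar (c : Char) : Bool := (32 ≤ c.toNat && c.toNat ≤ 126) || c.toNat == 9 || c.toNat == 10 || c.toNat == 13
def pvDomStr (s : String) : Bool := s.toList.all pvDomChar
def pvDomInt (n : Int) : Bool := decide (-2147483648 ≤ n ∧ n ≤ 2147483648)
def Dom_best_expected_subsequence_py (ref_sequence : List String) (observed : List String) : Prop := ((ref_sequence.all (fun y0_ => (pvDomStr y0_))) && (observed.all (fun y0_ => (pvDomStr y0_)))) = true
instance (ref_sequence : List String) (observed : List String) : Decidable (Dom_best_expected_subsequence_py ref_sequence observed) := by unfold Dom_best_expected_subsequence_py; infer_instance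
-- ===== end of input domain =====

-- B replaces A's bottom-up (n+1)×(m+1) edit-distance matrix by a top-down memoized recursion
-- ed(i,j) over prefix lengths (memo = a dict keyed on (i,j)), and replaces A's explicit
-- best/best_d accumulator loop by a first-argmin min-with-key over the window start indices
-- (same first-wins tie-break); same results, same asymptotic cost, not claimed faster.

-- ===== PORT A =====
-- the mutable 2D list dp, with Python's dp[i][j] read and dp[i][j] = v write
def pvGet (dp : List (List Int)) (i j : Nat) : Int := (dp.getD i []).getD j 0
def pvSet (dp : List (List Int)) (i j : Nat) (v : Int) : List (List Int) :=
  dp.set i ((dp.getD i []).set j v)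

-- port of _edit_distance; Python's 'for i in range(1, n+1)' is folded over List.range n with the
-- loop index written i+1, so a[i-1] becomes a.getD i "" (always in range, hence getD is exact)
def edit_distance_py (a b : List String) : Int :=
  let n := a.length
  let m := b.length
  if n = 0 then (m : Int)
  else if m = 0 then (n : Int)
  else
    let dp0 : List (List Int) := List.replicate (n+1) (List.replicate (m+1) (0:Int))
    let dp1 := (List.range (n+1)).foldl (fun dp i => pvSet dp i 0 (i : Int)) dp0
    let dp2 := (List.range (m+1)).foldl (fun dp j => pvSet dp 0 j (j : Int)) dp1
    let dp3 := (List.range n).foldl (fun dp i =>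
      (List.range m).foldl (fun dp j =>
        let cost : Int := if a.getD i "" = b.getD j "" then 0 else 1
        pvSet dp (i+1) (j+1)
          (min (min (pvGet dp i (j+1) + 1) (pvGet dp (i+1) j + 1)) (pvGet dp i j + cost))) dp) dp2
    pvGet dp3 a.length b.length

def best_expected_subsequence_py (ref_sequence : List String) (observed : List String) : List String :=
  if observed.length = 0 then []
  else
    let k : Int := observed.length
    if ref_sequence.length = 0 then []
    else if (ref_sequence.length : Int) ≤ k then ref_sequence
    else
      let best := PySem.List.slice ref_sequence none (some k)
      let best_d := edit_distance_py observed best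
      let r := (PySem.List.pyRange 1 ((ref_sequence.length : Int) - k + 1)).foldl
        (fun st i =>
          let cand := PySem.List.slice ref_sequence (some i) (some (i + k))
          let d := edit_distance_py observed cand
          if d < st.2 then (cand, d) else st)
        (best, best_d)
      r.1

-- ===== PORT B =====
-- port of B's memoized recursion ed(i, j) over prefix lengths; the Python memo dict is threaded
-- through the three recursive calls in evaluation order (min's arguments, left to right), the
-- result is paired with the updated memo
def edB (obs cand : List String) (i j : Nat) (memo : PySem.Dict (Nat × Nat) Int) :
    Int × PySem.Dict (Nat × Nat) Int :=
  if i = 0 then ((j : Int), memo)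
  else if j = 0 then ((i : Int), memo)
  else
    match memo.get? (i, j) with
    | some v => (v, memo)
    | none =>
      let c : Int := if obs.getD (i-1) "" = cand.getD (j-1) "" then 0 else 1
      let r1 := edB obs cand (i-1) j memo
      let r2 := edB obs cand i (j-1) r1.2
      let r3 := edB obs cand (i-1) (j-1) r2.2
      let v := min (min (r1.1 + 1) (r2.1 + 1)) (r3.1 + c)
      (v, r3.2.insert (i, j) v)
termination_by (i, j)
decreasing_by
  · exact Prod.Lex.left _ _ (by omega)
  · exact Prod.Lex.right _ (by omega)
  · exact Prod.Lex.left _ _ (by omega)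

-- B's dist(cand): call ed on the full prefix lengths with a fresh memo
def dist_alt (observed cand : List String) : Int :=
  (edB observed cand observed.length cand.length PySem.Dict.empty).1

def best_expected_subsequence_py_alt (ref_sequence : List String) (observed : List String) : List String :=
  if observed.length = 0 ∨ ref_sequence.length = 0 then []
  else
    let k : Int := observed.length
    let n : Int := ref_sequence.length
    if n ≤ k then ref_sequence
    else
      match PySem.List.min? (PySem.List.pyRange 0 (n - k + 1))
        (fun i => dist_alt observed (PySem.List.slice ref_sequence (some i) (some (i + k)))) with
      | some i => PySem.List.slice ref_sequence (some i) (some (i + k))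
      | none => []  -- unreachable: the index range is nonempty

-- ===== PRECONDITION & SPEC =====
def Spec_best_expected_subsequence_py (ref_sequence : List String) (observed : List String) (out : List String) : Prop := out = best_expected_subsequence_py_alt ref_sequence observed
instance (ref_sequence : List String) (observed : List String) (out : List String) : Decidable (Spec_best_expected_subsequence_py ref_sequence observed out) := by unfold Spec_best_expected_subsequence_py; infer_instance

-- ===== CLAIM (what is proved, stated in full; the proofs are below) =====
def Claim_equal_best_expected_subsequence_py : Prop := ∀ (ref_sequence : List String) (observed : List String), Dom_best_expected_subsequence_py ref_sequence observed → Spec_best_expected_subsequence_py ref_sequence observed (best_expected_subsequence_py ref_sequence observed)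

-- ===== LEMMAS AND PROOFS =====

-- the common reference: the textbook edit-distance recurrence on prefix lengths
def pvCost (a b : List String) (i j : Nat) : Nat := if a.getD i "" = b.getD j "" then 0 else 1

def edM (a b : List String) : Nat → Nat → Nat
  | 0, j => j
  | i+1, 0 => i+1
  | i+1, j+1 =>
      min (min (edM a b i (j+1) + 1) (edM a b (i+1) j + 1)) (edM a b i j + pvCost a b i j)
  termination_by i j => (i, j)

theorem edM_zero_left (a b : List String) (j : Nat) : edM a b 0 j = j := by
  cases j <;> simp [edM]

theorem edM_zero_right (a b : List String) (i : Nat) : edM a b i 0 = i := by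
  cases i <;> simp [edM]

-- ===== A-side: the DP table equals edM =====
theorem rowLen_pvSet (dp : List (List Int)) (i j : Nat) (v : Int) (r : Nat) :
    ((pvSet dp i j v).getD r []).length = (dp.getD r []).length := by
  simp only [pvSet, List.getD_eq_getElem?_getD, List.getElem?_set]
  by_cases h : i = r
  · subst h
    by_cases hi : i < dp.length
    · simp [hi]
    · simp [hi]
  · simp [h]

theorem fold_pvSet_dims {α : Type} (l : List α) (F : List (List Int) → α → List (List Int))
    (hF : ∀ dp x, (F dp x).length = dp.length ∧
      ∀ r, ((F dp x).getD r []).length = (dp.getD r []).length) :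
    ∀ dp, ((l.foldl F dp).length = dp.length ∧
      ∀ r, ((l.foldl F dp).getD r []).length = (dp.getD r []).length) := by
  induction l with
  | nil => intro dp; exact ⟨rfl, fun _ => rfl⟩
  | cons x t ih =>
      intro dp
      simp only [List.foldl_cons]
      refine ⟨(ih (F dp x)).1.trans (hF dp x).1, fun r => ?_⟩
      exact ((ih (F dp x)).2 r).trans ((hF dp x).2 r)

theorem pvSet_dims (i j : Nat) (v : Int) :
    ∀ (dp : List (List Int)), ((pvSet dp i j v).length = dp.length ∧
      ∀ r, ((pvSet dp i j v).getD r []).length = (dp.getD r []).length) :=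
  fun dp => ⟨List.length_set .., fun r => rowLen_pvSet dp i j v r⟩

theorem pvGet_pvSet (dp : List (List Int)) (i j : Nat) (v : Int)
    (hi : i < dp.length) (hj : j < (dp.getD i []).length) (i' j' : Nat) :
    pvGet (pvSet dp i j v) i' j' = if i' = i ∧ j' = j then v else pvGet dp i' j' := by
  have hj' : j < dp[i].length := by
    rw [List.getD_eq_getElem?_getD, List.getElem?_eq_getElem hi] at hj; exact hj
  simp only [pvGet, pvSet, List.getD_eq_getElem?_getD, List.getElem?_set]
  by_cases h : i = i'
  · subst h
    simp only [hi, if_pos trivial, List.getElem?_eq_getElem hi, Option.getD_some,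
      List.getElem?_set]
    by_cases h2 : j = j'
    · subst h2
      rw [if_pos rfl, if_pos hj', if_pos ⟨trivial, rfl⟩]
      rfl
    · rw [if_neg h2, if_neg (by intro hc; exact h2 hc.2.symm)]
  · rw [if_neg h, if_neg (by intro hc; exact h hc.1.symm)]

theorem dp1_char (N M : Nat) (hM : 0 < M) :
    ∀ (c : Nat) (dp : List (List Int)), c ≤ N → dp.length = N →
      (∀ r, r < N → (dp.getD r []).length = M) → ∀ (i' j' : Nat),
      pvGet ((List.range c).foldl (fun dp i => pvSet dp i 0 (i : Int)) dp) i' j'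
        = if i' < c ∧ j' = 0 then (i' : Int) else pvGet dp i' j' := by
  intro c
  induction c with
  | zero =>
      intro dp _ _ _ i' j'
      simp
  | succ c ih =>
      intro dp hc hL hR i' j'
      rw [List.range_succ, List.foldl_append]
      simp only [List.foldl_cons, List.foldl_nil]
      have dims := fold_pvSet_dims (List.range c) _ (fun dp i => pvSet_dims i 0 (i : Int) dp) dp
      rw [pvGet_pvSet _ _ _ _ (by omega) (by rw [dims.2]; rw [hR c (by omega)]; omega)]
      rw [ih dp (by omega) hL hR]
      split_ifs <;> first | rfl | omega

theorem dp2_char (N M : Nat) (hN : 0 < N) :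
    ∀ (c : Nat) (dp : List (List Int)), c ≤ M → dp.length = N →
      (∀ r, r < N → (dp.getD r []).length = M) → ∀ (i' j' : Nat),
      pvGet ((List.range c).foldl (fun dp j => pvSet dp 0 j (j : Int)) dp) i' j'
        = if i' = 0 ∧ j' < c then (j' : Int) else pvGet dp i' j' := by
  intro c
  induction c with
  | zero =>
      intro dp _ _ _ i' j'
      simp
  | succ c ih =>
      intro dp hc hL hR i' j'
      rw [List.range_succ, List.foldl_append]
      simp only [List.foldl_cons, List.foldl_nil]
      have dims := fold_pvSet_dims (List.range c) _ (fun dp j => pvSet_dims 0 j (j : Int) dp) dp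
      rw [pvGet_pvSet _ _ _ _ (by omega) (by rw [dims.2]; rw [hR 0 (by omega)]; omega)]
      rw [ih dp (by omega) hL hR]
      split_ifs <;> first | rfl | omega

theorem dpInner_char (a b : List String) (r : Nat) (hr : r < a.length)
    (dp : List (List Int))
    (hL : dp.length = a.length + 1)
    (hR : ∀ s, s < a.length + 1 → (dp.getD s []).length = b.length + 1)
    (H1 : ∀ i j, i ≤ r → j ≤ b.length → pvGet dp i j = (edM a b i j : Int))
    (H2 : ∀ i, i ≤ a.length → pvGet dp i 0 = (i : Int)) :
    ∀ c, c ≤ b.length → ∀ i' j',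
      pvGet ((List.range c).foldl (fun dp j =>
          pvSet dp (r+1) (j+1)
            (min (min (pvGet dp r (j+1) + 1) (pvGet dp (r+1) j + 1))
                 (pvGet dp r j + (if a.getD r "" = b.getD j "" then (0:Int) else 1)))) dp) i' j'
        = if i' = r+1 ∧ 1 ≤ j' ∧ j' ≤ c then (edM a b i' j' : Int) else pvGet dp i' j' := by
  intro c
  induction c with
  | zero =>
      intro _ i' j'
      simp only [List.range_zero, List.foldl_nil]
      split_ifs with h
      · omega
      · rfl
  | succ c ih =>
      intro hc i' j'
      rw [List.range_succ, List.foldl_append]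
      simp only [List.foldl_cons, List.foldl_nil]
      have dims := fold_pvSet_dims (List.range c)
        (fun dp j => pvSet dp (r+1) (j+1)
          (min (min (pvGet dp r (j+1) + 1) (pvGet dp (r+1) j + 1))
               (pvGet dp r j + (if a.getD r "" = b.getD j "" then (0:Int) else 1))))
        (fun dp j => pvSet_dims (r+1) (j+1) _ dp) dp
      have hc' : c ≤ b.length := by omega
      rw [pvGet_pvSet _ _ _ _ (by omega) (by rw [dims.2]; rw [hR (r+1) (by omega)]; omega)]
      rw [ih hc', ih hc', ih hc', ih hc']
      have e1 : (if r = r+1 ∧ 1 ≤ c+1 ∧ c+1 ≤ c then (edM a b r (c+1) : Int) else pvGet dp r (c+1))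
          = (edM a b r (c+1) : Int) := by
        rw [if_neg (by omega)]; exact H1 r (c+1) (le_refl r) (by omega)
      have e2 : (if r+1 = r+1 ∧ 1 ≤ c ∧ c ≤ c then (edM a b (r+1) c : Int) else pvGet dp (r+1) c)
          = (edM a b (r+1) c : Int) := by
        rcases Nat.eq_zero_or_pos c with h0 | h0
        · subst h0
          rw [if_neg (by omega), H2 (r+1) (by omega), edM_zero_right]
        · rw [if_pos (by omega)]
      have e3 : (if r = r+1 ∧ 1 ≤ c ∧ c ≤ c then (edM a b r c : Int) else pvGet dp r c)
          = (edM a b r c : Int) := by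
        rw [if_neg (by omega)]; exact H1 r c (le_refl r) (by omega)
      rw [e1, e2, e3]
      have hval : (min (min ((edM a b r (c+1) : Int) + 1) ((edM a b (r+1) c : Int) + 1))
            ((edM a b r c : Int) + (if a.getD r "" = b.getD c "" then (0:Int) else 1)))
          = (edM a b (r+1) (c+1) : Int) := by
        rw [show edM a b (r+1) (c+1) = min (min (edM a b r (c+1) + 1) (edM a b (r+1) c + 1))
              (edM a b r c + pvCost a b r c) from by simp [edM]]
        push_cast [pvCost]
        split_ifs <;> simp
      rw [hval]
      by_cases hij : i' = r+1 ∧ j' = c+1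
      · rw [if_pos hij, if_pos (by omega)]
        rw [hij.1, hij.2]
      · rw [if_neg hij]
        by_cases hij2 : i' = r+1 ∧ 1 ≤ j' ∧ j' ≤ c
        · rw [if_pos hij2, if_pos (by omega)]
        · rw [if_neg hij2, if_neg (by omega)]

theorem dpOuter_char (a b : List String) (dp : List (List Int))
    (hL : dp.length = a.length + 1)
    (hR : ∀ s, s < a.length + 1 → (dp.getD s []).length = b.length + 1)
    (H1 : ∀ i j, i = 0 → j ≤ b.length → pvGet dp i j = (edM a b i j : Int))
    (H2 : ∀ i, i ≤ a.length → pvGet dp i 0 = (i : Int)) :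
    ∀ r, r ≤ a.length →
      (∀ i j, i ≤ r → j ≤ b.length →
        pvGet ((List.range r).foldl (fun dp i =>
          (List.range b.length).foldl (fun dp j =>
            pvSet dp (i+1) (j+1)
              (min (min (pvGet dp i (j+1) + 1) (pvGet dp (i+1) j + 1))
                   (pvGet dp i j + (if a.getD i "" = b.getD j "" then (0:Int) else 1)))) dp) dp) i j
          = (edM a b i j : Int)) ∧
      (∀ i, i ≤ a.length →
        pvGet ((List.range r).foldl (fun dp i =>
          (List.range b.length).foldl (fun dp j =>
            pvSet dp (i+1) (j+1)
              (min (min (pvGet dp i (j+1) + 1) (pvGet dp (i+1) j + 1))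
                   (pvGet dp i j + (if a.getD i "" = b.getD j "" then (0:Int) else 1)))) dp) dp) i 0
          = (i : Int)) ∧
      ((List.range r).foldl (fun dp i =>
          (List.range b.length).foldl (fun dp j =>
            pvSet dp (i+1) (j+1)
              (min (min (pvGet dp i (j+1) + 1) (pvGet dp (i+1) j + 1))
                   (pvGet dp i j + (if a.getD i "" = b.getD j "" then (0:Int) else 1)))) dp) dp).length
          = a.length + 1 ∧
      (∀ s, s < a.length + 1 →
        (((List.range r).foldl (fun dp i =>
          (List.range b.length).foldl (fun dp j =>
            pvSet dp (i+1) (j+1)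
              (min (min (pvGet dp i (j+1) + 1) (pvGet dp (i+1) j + 1))
                   (pvGet dp i j + (if a.getD i "" = b.getD j "" then (0:Int) else 1)))) dp) dp).getD s []).length
          = b.length + 1) := by
  intro r
  induction r with
  | zero =>
      intro _
      refine ⟨fun i j hi hj => ?_, fun i hi => ?_, hL, hR⟩
      · simp only [List.range_zero, List.foldl_nil]
        exact H1 i j (by omega) hj
      · simp only [List.range_zero, List.foldl_nil]
        exact H2 i hi
  | succ r ih =>
      intro hr
      obtain ⟨ih1, ih2, ihL, ihR⟩ := ih (by omega)
      rw [List.range_succ, List.foldl_append]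
      simp only [List.foldl_cons, List.foldl_nil]
      have key := dpInner_char a b r (by omega) _ ihL ihR
        (fun i j hi hj => ih1 i j hi hj) (fun i hi => ih2 i hi) b.length (le_refl _)
      have dims := fold_pvSet_dims (List.range b.length)
        (fun dp j => pvSet dp (r+1) (j+1)
          (min (min (pvGet dp r (j+1) + 1) (pvGet dp (r+1) j + 1))
               (pvGet dp r j + (if a.getD r "" = b.getD j "" then (0:Int) else 1))))
        (fun dp j => pvSet_dims (r+1) (j+1) _ dp)
        ((List.range r).foldl (fun dp i =>
          (List.range b.length).foldl (fun dp j =>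
            pvSet dp (i+1) (j+1)
              (min (min (pvGet dp i (j+1) + 1) (pvGet dp (i+1) j + 1))
                   (pvGet dp i j + (if a.getD i "" = b.getD j "" then (0:Int) else 1)))) dp) dp)
      refine ⟨?_, ?_, dims.1.trans ihL, fun s hs => (dims.2 s).trans (ihR s hs)⟩
      · intro i j hi hj
        rw [key i j]
        by_cases h : i = r+1 ∧ 1 ≤ j ∧ j ≤ b.length
        · rw [if_pos h]
        · rw [if_neg h]
          rcases Nat.lt_or_ge i (r+1) with h2 | h2
          · exact ih1 i j (by omega) hj
          · have hi' : i = r + 1 := by omega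
            have hj' : j = 0 := by omega
            rw [hi', hj', ih2 (r+1) (by omega), edM_zero_right]
      · intro i hi
        rw [key i 0, if_neg (by omega)]
        exact ih2 i hi

theorem getD_replicate_dims (n m : Nat) (r : Nat) (hr : r < n) :
    ((List.replicate n (List.replicate m (0:Int))).getD r []).length = m := by
  rw [List.getD_eq_getElem?_getD, List.getElem?_replicate, if_pos hr]
  simp

theorem edA_eq (a b : List String) :
    edit_distance_py a b = (edM a b a.length b.length : Int) := by
  unfold edit_distance_py
  by_cases hn : a.length = 0
  · simp [hn, edM]
  · by_cases hm : b.length = 0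
    · simp [hn, hm, edM_zero_right]
    · simp only [hn, hm, if_false]
      have dims1 := fold_pvSet_dims (List.range (a.length+1)) _
        (fun dp i => pvSet_dims i 0 (i : Int) dp)
        (List.replicate (a.length+1) (List.replicate (b.length+1) (0:Int)))
      have dims2 := fold_pvSet_dims (List.range (b.length+1)) _
        (fun dp j => pvSet_dims 0 j (j : Int) dp)
        ((List.range (a.length+1)).foldl (fun dp i => pvSet dp i 0 (i : Int))
          (List.replicate (a.length+1) (List.replicate (b.length+1) (0:Int))))
      have hL0 : (List.replicate (a.length+1) (List.replicate (b.length+1) (0:Int))).length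
          = a.length + 1 := by simp
      have hR0 : ∀ r, r < a.length + 1 →
          ((List.replicate (a.length+1) (List.replicate (b.length+1) (0:Int))).getD r []).length
            = b.length + 1 := fun r hr => getD_replicate_dims _ _ r hr
      have hL1 := dims1.1.trans hL0
      have hR1 : ∀ r, r < a.length + 1 → _ := fun r hr => (dims1.2 r).trans (hR0 r hr)
      have hL2 := dims2.1.trans hL1
      have hR2 : ∀ r, r < a.length + 1 → _ := fun r hr => (dims2.2 r).trans (hR1 r hr)
      have H1 : ∀ i j, i = 0 → j ≤ b.length →
          pvGet ((List.range (b.length+1)).foldl (fun dp j => pvSet dp 0 j (j : Int))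
            ((List.range (a.length+1)).foldl (fun dp i => pvSet dp i 0 (i : Int))
              (List.replicate (a.length+1) (List.replicate (b.length+1) (0:Int))))) i j
            = (edM a b i j : Int) := by
        intro i j hi hj
        rw [dp2_char (a.length+1) (b.length+1) (by omega) (b.length+1) _ (le_refl _) hL1 hR1,
          if_pos (by omega), hi, edM_zero_left]
      have H2 : ∀ i, i ≤ a.length →
          pvGet ((List.range (b.length+1)).foldl (fun dp j => pvSet dp 0 j (j : Int))
            ((List.range (a.length+1)).foldl (fun dp i => pvSet dp i 0 (i : Int))
              (List.replicate (a.length+1) (List.replicate (b.length+1) (0:Int))))) i 0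
            = (i : Int) := by
        intro i hi
        rw [dp2_char (a.length+1) (b.length+1) (by omega) (b.length+1) _ (le_refl _) hL1 hR1,
          dp1_char (a.length+1) (b.length+1) (by omega) (a.length+1) _ (le_refl _) hL0 hR0]
        split_ifs <;> omega
      have final := (dpOuter_char a b _ hL2 hR2 H1 H2 a.length (le_refl _)).1 a.length b.length
        (le_refl _) (le_refl _)
      exact final

-- ===== B-side: the memoized recursion equals edM =====
-- a memo is good when every entry holds the edM value of its key
def GoodMemo (obs cand : List String) (memo : PySem.Dict (Nat × Nat) Int) : Prop :=
  ∀ p v, memo.get? p = some v → v = (edM obs cand p.1 p.2 : Int)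

theorem edB_correct (obs cand : List String) :
    ∀ (N i j : Nat) (memo : PySem.Dict (Nat × Nat) Int), i + j ≤ N →
      GoodMemo obs cand memo →
      (edB obs cand i j memo).1 = (edM obs cand i j : Int) ∧
        GoodMemo obs cand (edB obs cand i j memo).2 := by
  intro N
  induction N with
  | zero =>
      intro i j memo hN hG
      have hi : i = 0 := by omega
      subst hi
      rw [edB]
      simpa [edM_zero_left] using hG
  | succ N ih =>
      intro i j memo hN hG
      rcases Nat.eq_zero_or_pos i with hi | hi
      · subst hi
        rw [edB]
        simpa [edM_zero_left] using hG
      · rcases Nat.eq_zero_or_pos j with hj | hj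
        · subst hj
          rw [edB, if_neg (by omega : ¬ i = 0), if_pos rfl]
          exact ⟨by rw [edM_zero_right], hG⟩
        · rw [edB]
          simp only [if_neg (by omega : ¬ i = 0), if_neg (by omega : ¬ j = 0)]
          cases hmem : memo.get? (i, j) with
          | some v =>
              exact ⟨hG (i, j) v hmem, hG⟩
          | none =>
              simp only
              obtain ⟨h1, g1⟩ := ih (i-1) j memo (by omega) hG
              obtain ⟨h2, g2⟩ := ih i (j-1) _ (by omega) g1
              obtain ⟨h3, g3⟩ := ih (i-1) (j-1) _ (by omega) g2
              have hrec : edM obs cand i j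
                  = min (min (edM obs cand (i-1) j + 1) (edM obs cand i (j-1) + 1))
                        (edM obs cand (i-1) (j-1) + pvCost obs cand (i-1) (j-1)) := by
                obtain ⟨i', rfl⟩ : ∃ i', i = i' + 1 := ⟨i - 1, by omega⟩
                obtain ⟨j', rfl⟩ : ∃ j', j = j' + 1 := ⟨j - 1, by omega⟩
                simp [edM]
              have hval : min (min ((edB obs cand (i-1) j memo).1 + 1)
                    ((edB obs cand i (j-1) (edB obs cand (i-1) j memo).2).1 + 1))
                  ((edB obs cand (i-1) (j-1)
                      (edB obs cand i (j-1) (edB obs cand (i-1) j memo).2).2).1 +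
                    (if obs.getD (i-1) "" = cand.getD (j-1) "" then (0:Int) else 1))
                  = (edM obs cand i j : Int) := by
                rw [h1, h2, h3, hrec]
                push_cast [pvCost]
                split_ifs <;> simp
              refine ⟨hval, ?_⟩
              intro p v hp
              rw [PySem.Dict.get?_insert] at hp
              by_cases hpe : p = (i, j)
              · rw [if_pos hpe, Option.some_inj] at hp
                rw [hpe, ← hp, hval]
              · rw [if_neg hpe] at hp
                exact g3 p v hp

theorem distB_eq (a b : List String) :
    dist_alt a b = (edM a b a.length b.length : Int) := by
  have hG : GoodMemo a b PySem.Dict.empty := by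
    intro p v hp
    rw [PySem.Dict.get?_empty] at hp
    exact absurd hp (by simp)
  exact (edB_correct a b (a.length + b.length) a.length b.length PySem.Dict.empty
    (le_refl _) hG).1

-- ===== window search: A's best/best_d fold equals B's first-argmin =====
theorem fold_best_eq_argmin (key : Int → Int) (win : Int → List String) :
    ∀ (l : List Int) (m : Int),
      l.foldl (fun st i => if key i < st.2 then (win i, key i) else st) (win m, key m)
        = (win (l.foldl (fun m' i => if key i < key m' then i else m') m),
           key (l.foldl (fun m' i => if key i < key m' then i else m') m)) := by
  intro l
  induction l with
  | nil => intro m; rfl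
  | cons i t ih =>
      intro m
      simp only [List.foldl_cons]
      by_cases h : key i < key m
      · rw [if_pos h, if_pos h]
        exact ih i
      · rw [if_neg h, if_neg h]
        exact ih m

theorem min?_cons_fold (key : Int → Int) (l : List Int) (m : Int) :
    PySem.List.min? (m :: l) key
      = some (l.foldl (fun m' i => if key i < key m' then i else m') m) := by
  show l.foldl _ (some m) = _
  induction l generalizing m with
  | nil => rfl
  | cons i t ih =>
      simp only [List.foldl_cons]
      by_cases h : key i < key m
      · rw [if_pos h, if_pos h]
        exact ih i
      · rw [if_neg h, if_neg h]
        exact ih m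

theorem slice_zero (xs : List String) (b : Int) :
    PySem.List.slice xs none (some b) = PySem.List.slice xs (some 0) (some b) := by
  simp [PySem.List.slice, PySem.List.clampIdx]

-- ===== VERDICT (by name: the statement is the Claim_ definition above) =====
theorem best_expected_subsequence_py_spec : Claim_equal_best_expected_subsequence_py := by
  intro ref obs _
  show best_expected_subsequence_py ref obs = best_expected_subsequence_py_alt ref obs
  by_cases h1 : obs.length = 0
  · simp [best_expected_subsequence_py, best_expected_subsequence_py_alt, h1]
  · by_cases h2 : ref.length = 0
    · simp [best_expected_subsequence_py, best_expected_subsequence_py_alt, h1, h2]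
    · by_cases h3 : (ref.length : Int) ≤ (obs.length : Int)
      · simp [best_expected_subsequence_py, best_expected_subsequence_py_alt, h1, h2, h3]
      · -- main case: k < n
        have hX : (0 : Int) < (ref.length : Int) - (obs.length : Int) + 1 := by omega
        set key : Int → Int := fun i =>
          edit_distance_py obs (PySem.List.slice ref (some i) (some (i + (obs.length : Int))))
          with hkey
        set win : Int → List String := fun i =>
          PySem.List.slice ref (some i) (some (i + (obs.length : Int))) with hwin
        have hkeyB : (fun i => dist_alt obs
              (PySem.List.slice ref (some i) (some (i + (obs.length : Int))))) = key := by
          funext i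
          show dist_alt obs _ = key i
          rw [hkey]
          show _ = edit_distance_py obs _
          rw [distB_eq, edA_eq]
        have hA : best_expected_subsequence_py ref obs
            = win ((PySem.List.pyRange 1 ((ref.length : Int) - (obs.length : Int) + 1)).foldl
                (fun m' i => if key i < key m' then i else m') 0) := by
          simp only [best_expected_subsequence_py, h1, h2, h3, if_false]
          rw [slice_zero]
          have : PySem.List.slice ref (some 0) (some (obs.length : Int))
              = win 0 := by rw [hwin]; norm_num
          rw [this]
          have hfold := fold_best_eq_argmin key win
            (PySem.List.pyRange 1 ((ref.length : Int) - (obs.length : Int) + 1)) 0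
          exact congrArg Prod.fst hfold
        have hB : best_expected_subsequence_py_alt ref obs
            = win ((PySem.List.pyRange 1 ((ref.length : Int) - (obs.length : Int) + 1)).foldl
                (fun m' i => if key i < key m' then i else m') 0) := by
          simp only [best_expected_subsequence_py_alt, h1, h2, h3, if_false, or_self]
          rw [PySem.List.pyRange_one_cons hX, hkeyB, min?_cons_fold]
          norm_num
          rfl
        rw [hA, hB]
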